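-- pv_equiv track=rewrite | github.com/Combinatorials-Neel/DaHU | modules/functions/functions_shared.py | detect_measurement
-- ===== SOURCE A (Python) =====
-- def detect_measurement(filename_list: list):
--     """
--     Scan a folder to determine which type of measurement it is
--
--     Parameters:
--         filename_list (list): list containing all filenames to parse
--
--     Returns:
--         version (str): detected measurement type
--     """
--     measurement_dict = {
--         "XRD": ["ras"],
--         "MOKE": ["log"],
--         "EDX": ["spx"],
--         "PROFIL": ["asc2d"],
--         "ESRF": ["h5"],
--         "XRD results": ["lst"],
--         "Annealing": ["HIS"],
--         "Magnetron": ["prp"],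
--         "SQUID": ["dat"]
--     }
--
--     for measurement_type, file_type in measurement_dict.items():
--         for filename in filename_list:
--             if filename.startswith("."):  # Skip hidden files
--                 continue
--             if (
--                 filename.split(".")[-1] in file_type
--             ):  # Check extensions for correspondence to the dictionary spec
--                 depth = filename.count("/")
--                 return measurement_type, depth
--     return None
-- ===== SOURCE B (Python) =====
-- def detect_measurement(filename_list: list):
--     """Single-pass variant: index extensions once, record the first matching
--     file's depth per measurement type, then pick the highest-priority type."""
--     measurement_dict = {
--         "XRD": ["ras"],
--         "MOKE": ["log"],
--         "EDX": ["spx"],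
--         "PROFIL": ["asc2d"],
--         "ESRF": ["h5"],
--         "XRD results": ["lst"],
--         "Annealing": ["HIS"],
--         "Magnetron": ["prp"],
--         "SQUID": ["dat"]
--     }
--     ext_index = {ext: mt for mt, exts in measurement_dict.items() for ext in exts}
--     seen = {}
--     for filename in filename_list:
--         if filename.startswith("."):  # Skip hidden files
--             continue
--         mt = ext_index.get(filename.split(".")[-1])
--         if mt is not None and mt not in seen:
--             seen[mt] = filename.count("/")
--     for measurement_type in measurement_dict:
--         if measurement_type in seen:
--             return measurement_type, seen[measurement_type]
--     return None
-- ===== Notes on version B (the rewrite author's own statement) =====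
-- stated objective: faster
-- what changed: Replaces the 9x n nested loops (one full rescan of the filename list per measurement type) with a single pass over the filenames using an extension-to-type index dict and a first-depth-per-type map, followed by one scan of the 9 types in priority order.
import Mathlib
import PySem

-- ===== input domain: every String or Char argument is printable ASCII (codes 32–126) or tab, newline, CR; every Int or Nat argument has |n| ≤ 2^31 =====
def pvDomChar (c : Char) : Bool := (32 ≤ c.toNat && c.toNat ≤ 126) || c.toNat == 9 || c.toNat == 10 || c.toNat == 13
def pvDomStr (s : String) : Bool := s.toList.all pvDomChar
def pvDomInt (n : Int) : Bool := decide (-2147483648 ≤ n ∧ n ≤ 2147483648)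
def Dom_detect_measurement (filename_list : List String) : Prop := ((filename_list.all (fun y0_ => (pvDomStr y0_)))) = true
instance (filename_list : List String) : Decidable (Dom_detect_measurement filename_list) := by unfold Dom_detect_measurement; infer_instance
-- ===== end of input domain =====

-- B replaces A's per-type rescans of the filename list with one pass over the
-- filenames (extension->type index, first depth recorded per type) plus one
-- priority scan over the 9 types; a timing run measures the speed claim.


-- filename.split(".")[-1]: split? is `some` (separator nonempty) and Python's
-- str.split always yields a nonempty list, so the defaults are unreachable.
def pvExt (f : String) : String :=
  PySem.List.pyGetD ((PySem.Str.split? f ".").getD []) (-1) ""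

-- ===== PORT A =====
def pvMeasurementDict : List (String × List String) :=
  [("XRD", ["ras"]), ("MOKE", ["log"]), ("EDX", ["spx"]), ("PROFIL", ["asc2d"]),
   ("ESRF", ["h5"]), ("XRD results", ["lst"]), ("Annealing", ["HIS"]),
   ("Magnetron", ["prp"]), ("SQUID", ["dat"])]

-- A's inner loop over filename_list for one (measurement_type, file_type) item
def pvInner (mt : String) (exts : List String) : List String → Option (String × Int)
  | [] => none
  | f :: rest =>
    if PySem.Str.startswith f "." then pvInner mt exts rest
    else if pvExt f ∈ exts then some (mt, (PySem.Str.count f "/" : Int))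
    else pvInner mt exts rest

def detect_measurement (filename_list : List String) : Option (String × Int) :=
  pvMeasurementDict.findSome? (fun p => pvInner p.1 p.2 filename_list)

-- ===== PORT B =====
def pvTypes : List (String × String) :=
  [("XRD", "ras"), ("MOKE", "log"), ("EDX", "spx"), ("PROFIL", "asc2d"),
   ("ESRF", "h5"), ("XRD results", "lst"), ("Annealing", "HIS"),
   ("Magnetron", "prp"), ("SQUID", "dat")]

-- ext_index = {ext: mt for mt, exts in measurement_dict.items() for ext in exts}
def pvExtIndex : PySem.Dict String String :=
  PySem.Dict.ofList (pvTypes.map (fun p => (p.2, p.1)))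

-- the single pass building seen : type -> depth of the first matching file
def pvBuildSeen (filename_list : List String) : PySem.Dict String Int :=
  filename_list.foldl (fun seen f =>
    if PySem.Str.startswith f "." then seen
    else
      match pvExtIndex.get? (pvExt f) with
      | none => seen
      | some mt =>
        if seen.contains mt then seen
        else seen.insert mt ((PySem.Str.count f "/" : Int))) PySem.Dict.empty

def detect_measurement_alt (filename_list : List String) : Option (String × Int) :=
  let seen := pvBuildSeen filename_list
  pvTypes.findSome? (fun p => (seen.get? p.1).map (fun d => (p.1, d)))

-- ===== PRECONDITION & SPEC =====
def Spec_detect_measurement (filename_list : List String) (out : Option (String × Int)) : Prop := out = detect_measurement_alt filename_list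
instance (filename_list : List String) (out : Option (String × Int)) : Decidable (Spec_detect_measurement filename_list out) := by unfold Spec_detect_measurement; infer_instance

-- ===== CLAIM (what is proved, stated in full; the proofs are below) =====
def Claim_equal_detect_measurement : Prop := ∀ (filename_list : List String), Dom_detect_measurement filename_list → Spec_detect_measurement filename_list (detect_measurement filename_list)

-- ===== LEMMAS AND PROOFS =====

-- first depth of a non-hidden file with extension ext (common characterization)
def pvFd (ext : String) : List String → Option Int
  | [] => none
  | f :: rest =>
    if PySem.Str.startswith f "." then pvFd ext rest
    else if pvExt f == ext then some ((PySem.Str.count f "/" : Int))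
    else pvFd ext rest

lemma pvInner_eq (mt ext : String) (fl : List String) :
    pvInner mt [ext] fl = (pvFd ext fl).map (fun d => (mt, d)) := by
  induction fl with
  | nil => rfl
  | cons f rest ih =>
    simp only [pvInner, pvFd]
    split_ifs with h1 h2 h3 <;> simp_all

lemma pvExtIndex_get (s : String) : pvExtIndex.get? s =
    if "ras" == s then some "XRD" else if "log" == s then some "MOKE"
    else if "spx" == s then some "EDX" else if "asc2d" == s then some "PROFIL"
    else if "h5" == s then some "ESRF" else if "lst" == s then some "XRD results"
    else if "HIS" == s then some "Annealing" else if "prp" == s then some "Magnetron"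
    else if "dat" == s then some "SQUID" else none := by
  have h : pvExtIndex = PySem.Dict.mk
    [("ras", "XRD"), ("log", "MOKE"), ("spx", "EDX"), ("asc2d", "PROFIL"),
     ("h5", "ESRF"), ("lst", "XRD results"), ("HIS", "Annealing"),
     ("prp", "Magnetron"), ("dat", "SQUID")] := by decide
  rw [h]
  simp only [PySem.Dict.get?_mk_cons]
  rfl

lemma pvLookup_self : ∀ p ∈ pvTypes, pvExtIndex.get? p.2 = some p.1 := by decide

lemma pvKeysNodup : (pvTypes.map Prod.fst).Nodup := by decide

lemma pvKeyInj {l : List (String × String)} (h : (l.map Prod.fst).Nodup) :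
    ∀ {a b c : String}, (a, b) ∈ l → (a, c) ∈ l → b = c := by
  induction l with
  | nil => intro a b c h1 _; cases h1
  | cons p rest ih =>
    intro a b c h1 h2
    simp only [List.map_cons, List.nodup_cons, List.mem_map, not_exists] at h
    rcases List.mem_cons.mp h1 with rfl | h1' <;> rcases List.mem_cons.mp h2 with h2' | h2'
    · cases h2'; rfl
    · exact absurd ⟨h2', rfl⟩ (h.1 (a, c))
    · cases h2'; exact absurd ⟨h1', rfl⟩ (h.1 (a, b))
    · exact ih h.2 h1' h2'

lemma pvLookup_mem (s mt : String) (h : pvExtIndex.get? s = some mt) : (mt, s) ∈ pvTypes := by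
  rw [pvExtIndex_get] at h
  split_ifs at h <;> simp_all [pvTypes]

lemma pvLookup_inj (mt ext s : String) (hm : (mt, ext) ∈ pvTypes)
    (h : pvExtIndex.get? s = some mt) : s = ext :=
  pvKeyInj pvKeysNodup (pvLookup_mem s mt h) hm

lemma pvBuildSeen_get (mt ext : String) (hm : (mt, ext) ∈ pvTypes) (fl : List String) :
    ∀ seen : PySem.Dict String Int,
    (fl.foldl (fun seen f =>
      if PySem.Str.startswith f "." then seen
      else
        match pvExtIndex.get? (pvExt f) with
        | none => seen
        | some mt =>
          if seen.contains mt then seen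
          else seen.insert mt ((PySem.Str.count f "/" : Int))) seen).get? mt
      = (seen.get? mt).or (pvFd ext fl) := by
  induction fl with
  | nil => intro seen; simp only [List.foldl_nil, pvFd, Option.or_none]
  | cons f rest ih =>
    intro seen
    rw [List.foldl_cons]
    by_cases hh : PySem.Str.startswith f "." = true
    · rw [if_pos hh, ih]
      have hfd : pvFd ext (f :: rest) = pvFd ext rest := by
        simp only [pvFd]; rw [if_pos hh]
      rw [hfd]
    · rw [if_neg hh]
      have hfd : pvFd ext (f :: rest) =
          if (pvExt f == ext) = true then some ((PySem.Str.count f "/" : Int))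
          else pvFd ext rest := by
        simp only [pvFd]; rw [if_neg hh]
      rcases ho : pvExtIndex.get? (pvExt f) with _ | T
      · have hne : ¬ ((pvExt f == ext) = true) := by
          intro he
          have hs := pvLookup_self (mt, ext) hm
          rw [← (beq_iff_eq.mp he), ho] at hs
          simp at hs
        dsimp only
        rw [ih, hfd, if_neg hne]
      · dsimp only
        by_cases hTm : T = mt
        · subst hTm
          have he : pvExt f = ext := pvLookup_inj T ext _ hm ho
          by_cases hc : seen.contains T = true
          · rw [if_pos hc, ih, hfd, if_pos (beq_iff_eq.mpr he)]
            have hs : (seen.get? T).isSome := by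
              rw [← PySem.Dict.contains_eq_isSome_get?]; exact hc
            obtain ⟨v, hv⟩ := Option.isSome_iff_exists.mp hs
            rw [hv, Option.some_or, Option.some_or]
          · rw [if_neg hc, ih, hfd, if_pos (beq_iff_eq.mpr he)]
            have hn : seen.get? T = none := by
              rw [PySem.Dict.get?_eq_none_iff_contains]
              simpa using hc
            rw [hn, Option.none_or, PySem.Dict.get?_insert_self, Option.some_or]
        · have hne : ¬ ((pvExt f == ext) = true) := by
            intro he
            have hs := pvLookup_self (mt, ext) hm
            rw [← (beq_iff_eq.mp he), ho] at hs
            exact hTm (Option.some_inj.mp hs)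
          rw [hfd, if_neg hne]
          by_cases hc : seen.contains T = true
          · rw [if_pos hc, ih]
          · rw [if_neg hc, ih, PySem.Dict.get?_insert_of_ne _ _ (Ne.symm hTm)]

theorem pv_main (fl : List String) : detect_measurement fl = detect_measurement_alt fl := by
  have key : ∀ mt ext, (mt, ext) ∈ pvTypes → (pvBuildSeen fl).get? mt = pvFd ext fl := by
    intro mt ext hm
    have h := pvBuildSeen_get mt ext hm fl PySem.Dict.empty
    simpa only [pvBuildSeen, PySem.Dict.get?_empty, Option.none_or] using h
  simp only [detect_measurement, detect_measurement_alt, pvMeasurementDict, pvTypes,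
    List.findSome?_cons, List.findSome?_nil, pvInner_eq]
  rw [key "XRD" "ras" (by decide), key "MOKE" "log" (by decide),
    key "EDX" "spx" (by decide), key "PROFIL" "asc2d" (by decide),
    key "ESRF" "h5" (by decide), key "XRD results" "lst" (by decide),
    key "Annealing" "HIS" (by decide), key "Magnetron" "prp" (by decide),
    key "SQUID" "dat" (by decide)]

-- ===== VERDICT (by name: the statement is the Claim_ definition above) =====
theorem detect_measurement_spec : Claim_equal_detect_measurement := by
  intro fl _
  unfold Spec_detect_measurement
  exact pv_main fl
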